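-- pv_equiv track=rewrite | github.com/mautorresp/Teleport | teleport/generators.py | _lfsr_step
-- ===== SOURCE A (Python) =====
-- def _lfsr_step(word: int, taps: int) -> int:
--     """
--     8-bit LFSR step: XOR tap parity on LSB, shift right, insert feedback in MSB
--     """
--     # Compute parity bit of (word & taps)
--     v = word & taps
--     fb = 0
--     while v:
--         fb ^= (v & 1)
--         v >>= 1
--
--     # Shift right and insert feedback in MSB
--     out = ((word >> 1) | ((fb & 1) << 7)) & 0xFF
--     return out
-- ===== SOURCE B (Python) =====
-- def _lfsr_step(word: int, taps: int) -> int: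
--     # parity of (word & taps) via a divide-and-conquer XOR fold instead of a bit loop
--     v = word & taps
--     for k in (32, 16, 8, 4, 2, 1):
--         v ^= v >> k
--     return ((word >> 1) | ((v & 1) << 7)) & 0xFF
-- ===== Notes on version B (the rewrite author's own statement) =====
-- stated objective: alternative
-- what changed: The bit-by-bit while-loop parity scan over word & taps is replaced by a logarithmic divide-and-conquer XOR fold (v ^= v >> k for k = 32,16,8,4,2,1); Pre_ excludes word < 0 and taps < 0 simultaneously, where A's while loop never terminates because v stays negative.
import Mathlib
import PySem

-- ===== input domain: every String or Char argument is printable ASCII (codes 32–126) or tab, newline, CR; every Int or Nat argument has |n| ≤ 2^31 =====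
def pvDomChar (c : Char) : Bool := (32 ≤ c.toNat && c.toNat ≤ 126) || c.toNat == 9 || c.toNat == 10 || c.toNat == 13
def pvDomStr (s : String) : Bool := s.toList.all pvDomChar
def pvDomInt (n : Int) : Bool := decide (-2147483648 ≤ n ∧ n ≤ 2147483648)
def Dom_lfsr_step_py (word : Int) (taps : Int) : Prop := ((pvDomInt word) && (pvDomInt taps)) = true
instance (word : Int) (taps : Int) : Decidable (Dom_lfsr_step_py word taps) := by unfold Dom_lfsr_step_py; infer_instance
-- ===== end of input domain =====

-- B replaces A's bit-by-bit parity while-loop by a 6-step divide-and-conquer XOR fold (alternative decomposition, same cost class).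

-- ===== PORT A =====
-- A's 'while v:' loop; the 0 < v guard only makes it total (Pre_ guarantees 0 ≤ v,
-- where 'v ≠ 0' and '0 < v' coincide; for v < 0 Python's loop never terminates).
def pvParLoopA (fb v : Int) : Int :=
  if h : 0 < v then pvParLoopA (PySem.Int.bxor fb (PySem.Int.band v 1)) (v >>> (1 : Nat)) else fb
termination_by v.toNat
decreasing_by
  have hv : v = ((v.toNat : Nat) : Int) := (Int.toNat_of_nonneg h.le).symm
  rw [hv, ← Int.natCast_shiftRight, Int.toNat_natCast, Int.toNat_natCast]
  have : v.toNat ≠ 0 := by omega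
  simp only [Nat.shiftRight_eq_div_pow, pow_one]
  omega

def lfsr_step_py (word : Int) (taps : Int) : Int :=
  let v := PySem.Int.band word taps
  let fb := pvParLoopA 0 v
  PySem.Int.band (PySem.Int.bor (word >>> (1 : Nat)) (PySem.Int.band fb 1 <<< (7 : Nat))) 255

-- ===== PORT B =====
def lfsr_step_py_alt (word : Int) (taps : Int) : Int :=
  let v := List.foldl (fun (v : Int) (k : Nat) => PySem.Int.bxor v (v >>> k))
    (PySem.Int.band word taps) [32, 16, 8, 4, 2, 1]
  PySem.Int.band (PySem.Int.bor (word >>> (1 : Nat)) (PySem.Int.band v 1 <<< (7 : Nat))) 255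

-- ===== PRECONDITION & SPEC =====
-- Pre_ excludes word < 0 ∧ taps < 0 (then word & taps < 0 and A's while loop never terminates).
def Pre_lfsr_step_py (word : Int) (taps : Int) : Prop := 0 ≤ word ∨ 0 ≤ taps
instance (word : Int) (taps : Int) : Decidable (Pre_lfsr_step_py word taps) := by
  unfold Pre_lfsr_step_py; infer_instance

def pvWitness_lfsr_step_py : Int × Int := (181, 29)

def Spec_lfsr_step_py (word : Int) (taps : Int) (out : Int) : Prop := out = lfsr_step_py_alt word taps
instance (word : Int) (taps : Int) (out : Int) : Decidable (Spec_lfsr_step_py word taps out) := by unfold Spec_lfsr_step_py; infer_instance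

-- ===== CLAIM (what is proved, stated in full; the proofs are below) =====
def Claim_equal_lfsr_step_py : Prop := ∀ (word : Int) (taps : Int), Dom_lfsr_step_py word taps → Pre_lfsr_step_py word taps → Spec_lfsr_step_py word taps (lfsr_step_py word taps)

-- ===== LEMMAS AND PROOFS =====

-- parity of the bits of a natural number
def pvParN (n : Nat) : Nat :=
  if h : n = 0 then 0 else (n % 2) ^^^ pvParN (n / 2)
termination_by n
decreasing_by omega

theorem pvParN_zero : pvParN 0 = 0 := by rw [pvParN]; simp

theorem pvParN_eq (n : Nat) : pvParN n = (n % 2) ^^^ pvParN (n / 2) := by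
  rw [pvParN]
  split_ifs with h
  · subst h; simp [pvParN_zero]
  · rfl

theorem pvParN_lt_two (n : Nat) : pvParN n < 2 := by
  induction n using Nat.strong_induction_on with
  | _ n ih =>
    rcases Nat.eq_zero_or_pos n with h | h
    · subst h; simp [pvParN_zero]
    · rw [pvParN_eq]
      have h1 : n % 2 < 2 := Nat.mod_lt _ (by omega)
      have h2 : pvParN (n / 2) < 2 := ih (n / 2) (by omega)
      interval_cases hm : (n % 2) <;> interval_cases hp : (pvParN (n / 2)) <;> decide

theorem pvParN_small (m : Nat) (h : m < 2) : pvParN m = m := by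
  interval_cases m
  · exact pvParN_zero
  · rw [pvParN_eq]; norm_num [pvParN_zero]

theorem pvParN_xor (a b : Nat) : pvParN (a ^^^ b) = pvParN a ^^^ pvParN b := by
  induction a using Nat.strong_induction_on generalizing b with
  | _ a ih =>
    rcases Nat.eq_zero_or_pos a with ha | ha
    · subst ha; simp [pvParN_zero]
    · rw [pvParN_eq (a ^^^ b), pvParN_eq a, pvParN_eq b]
      have hm : (a ^^^ b) % 2 = a % 2 ^^^ b % 2 := by
        have := @Nat.xor_mod_two_pow a b 1
        simpa using this
      rw [hm, Nat.xor_div_two, ih (a / 2) (by omega) (b / 2)]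
      rw [Nat.xor_assoc, Nat.xor_assoc]
      congr 1
      rw [← Nat.xor_assoc, ← Nat.xor_assoc]
      congr 1
      exact Nat.xor_comm _ _

theorem pvParN_split (k x : Nat) : pvParN (x % 2 ^ k) ^^^ pvParN (x / 2 ^ k) = pvParN x := by
  induction k generalizing x with
  | zero => simp [Nat.mod_one, Nat.div_one, pvParN_zero]
  | succ k ih =>
    have hpow : (2 : Nat) ^ (k + 1) = 2 * 2 ^ k := by ring
    conv_lhs => rw [pvParN_eq (x % 2 ^ (k + 1))]
    have h1 : x % 2 ^ (k + 1) % 2 = x % 2 :=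
      Nat.mod_mod_of_dvd x ⟨2 ^ k, by rw [hpow]⟩
    have h2 : x % 2 ^ (k + 1) / 2 = x / 2 % 2 ^ k := by
      rw [hpow]; exact Nat.mod_mul_right_div_self x 2 (2 ^ k)
    have h3 : x / 2 ^ (k + 1) = x / 2 / 2 ^ k := by
      rw [Nat.div_div_eq_div_mul, hpow]
    rw [h1, h2, h3, Nat.xor_assoc, ih (x / 2)]
    exact (pvParN_eq x).symm

theorem pvParN_fold_step (m k : Nat) :
    pvParN ((m ^^^ m >>> k) % 2 ^ k) = pvParN (m % 2 ^ (2 * k)) := by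
  rw [Nat.xor_mod_two_pow, pvParN_xor]
  have hs : m >>> k % 2 ^ k = m / 2 ^ k % 2 ^ k := by rw [Nat.shiftRight_eq_div_pow]
  have h2 : (2 : Nat) ^ (2 * k) = 2 ^ k * 2 ^ k := by rw [two_mul, pow_add]
  have ha : m % 2 ^ (2 * k) % 2 ^ k = m % 2 ^ k :=
    Nat.mod_mod_of_dvd m ⟨2 ^ k, h2⟩
  have hb : m % 2 ^ (2 * k) / 2 ^ k = m / 2 ^ k % 2 ^ k := by
    rw [h2]; exact Nat.mod_mul_right_div_self m (2 ^ k) (2 ^ k)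
  rw [hs, ← ha, ← hb]
  exact pvParN_split k (m % 2 ^ (2 * k))

theorem pvFold_parity (n n1 n2 n3 n4 n5 n6 : Nat) (h : n < 2 ^ 64)
    (h1 : n1 = n ^^^ n >>> 32) (h2 : n2 = n1 ^^^ n1 >>> 16) (h3 : n3 = n2 ^^^ n2 >>> 8)
    (h4 : n4 = n3 ^^^ n3 >>> 4) (h5 : n5 = n4 ^^^ n4 >>> 2) (h6 : n6 = n5 ^^^ n5 >>> 1) :
    n6 % 2 = pvParN n := by
  have e1 : pvParN (n6 % 2 ^ 1) = pvParN (n5 % 2 ^ 2) := by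
    subst h6; have := pvParN_fold_step n5 1; norm_num at this ⊢; exact this
  have e2 : pvParN (n5 % 2 ^ 2) = pvParN (n4 % 2 ^ 4) := by
    subst h5; have := pvParN_fold_step n4 2; norm_num at this ⊢; exact this
  have e3 : pvParN (n4 % 2 ^ 4) = pvParN (n3 % 2 ^ 8) := by
    subst h4; have := pvParN_fold_step n3 4; norm_num at this ⊢; exact this
  have e4 : pvParN (n3 % 2 ^ 8) = pvParN (n2 % 2 ^ 16) := by
    subst h3; have := pvParN_fold_step n2 8; norm_num at this ⊢; exact this
  have e5 : pvParN (n2 % 2 ^ 16) = pvParN (n1 % 2 ^ 32) := by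
    subst h2; have := pvParN_fold_step n1 16; norm_num at this ⊢; exact this
  have e6 : pvParN (n1 % 2 ^ 32) = pvParN (n % 2 ^ 64) := by
    subst h1; have := pvParN_fold_step n 32; norm_num at this ⊢; exact this
  have hmod : n % 2 ^ 64 = n := Nat.mod_eq_of_lt h
  have hsmall : pvParN (n6 % 2 ^ 1) = n6 % 2 := by
    rw [pow_one]; exact pvParN_small _ (Nat.mod_lt _ (by omega))
  rw [← hsmall, e1, e2, e3, e4, e5, e6, hmod]

-- A's loop computes ↑(f ^^^ pvParN n) on a nonnegative argument
theorem pvLoopA_eq (n : Nat) : ∀ f : Nat, pvParLoopA (↑f) (↑n) = ↑(f ^^^ pvParN n) := by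
  induction n using Nat.strong_induction_on with
  | _ n ih =>
    intro f
    rw [pvParLoopA]
    rcases Nat.eq_zero_or_pos n with h0 | h0
    · subst h0; simp [pvParN_zero]
    · have hpos : (0 : Int) < ↑n := by exact_mod_cast h0
      rw [dif_pos hpos]
      have hb : PySem.Int.band (↑n) 1 = ((n &&& 1 : Nat) : Int) := by
        rw [show (1 : Int) = ((1 : Nat) : Int) from rfl, PySem.Int.band_natCast]
      rw [hb, PySem.Int.bxor_natCast, ← Int.natCast_shiftRight]
      have hlt : n >>> 1 < n := by
        simp only [Nat.shiftRight_eq_div_pow, pow_one]; omega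
      rw [ih (n >>> 1) hlt (f ^^^ (n &&& 1))]
      congr 1
      conv_rhs => rw [pvParN_eq n]
      rw [Nat.and_one_is_mod, Nat.xor_assoc, Nat.shiftRight_eq_div_pow, pow_one]

theorem pvBand_le_left (a b : Int) (h : 0 ≤ a) : PySem.Int.band a b ≤ a := by
  simp only [PySem.Int.band]
  split_ifs <;> try omega
  have := Nat.and_le_left (n := a.toNat) (m := b.toNat); omega

theorem pvBand_cast_one (x : Nat) : PySem.Int.band (↑x) 1 = ((x % 2 : Nat) : Int) := by
  rw [show (1 : Int) = ((1 : Nat) : Int) from rfl, PySem.Int.band_natCast, Nat.and_one_is_mod]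

theorem pvFoldB (x : Nat) (ks : List Nat) :
    List.foldl (fun (v : Int) (k : Nat) => PySem.Int.bxor v (v >>> k)) ((x : Nat) : Int) ks =
      ((List.foldl (fun v k => v ^^^ v >>> k) x ks : Nat) : Int) := by
  induction ks generalizing x with
  | nil => rfl
  | cons k ks ih =>
    simp only [List.foldl_cons, ← Int.natCast_shiftRight, PySem.Int.bxor_natCast]
    exact ih (x ^^^ x >>> k)

-- ===== VERDICT (by name: the statement is the Claim_ definition above) =====
theorem lfsr_step_py_spec : Claim_equal_lfsr_step_py := by
  intro word taps hdom hpre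
  unfold Spec_lfsr_step_py
  simp only [lfsr_step_py, lfsr_step_py_alt]
  have hv : 0 ≤ PySem.Int.band word taps := by
    rcases hpre with h | h
    · exact PySem.Int.band_nonneg_of_nonneg_left _ h
    · rw [PySem.Int.band_comm]; exact PySem.Int.band_nonneg_of_nonneg_left _ h
  obtain ⟨n, hn⟩ : ∃ n : Nat, PySem.Int.band word taps = ↑n :=
    ⟨(PySem.Int.band word taps).toNat, (Int.toNat_of_nonneg hv).symm⟩
  have hbound : n < 2 ^ 64 := by
    have hle : PySem.Int.band word taps ≤ 2147483648 := by
      unfold Dom_lfsr_step_py at hdom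
      simp only [Bool.and_eq_true, pvDomInt, decide_eq_true_eq] at hdom
      rcases hpre with h | h
      · exact le_trans (pvBand_le_left word taps h) (by omega)
      · rw [PySem.Int.band_comm]
        exact le_trans (pvBand_le_left taps word h) (by omega)
    rw [hn] at hle
    have h64 : (2 : Nat) ^ 64 = 18446744073709551616 := by norm_num
    omega
  rw [hn]
  have hloop : pvParLoopA 0 (↑n) = ((pvParN n : Nat) : Int) := by
    have := pvLoopA_eq n 0
    simpa using this
  have hNat : (List.foldl (fun (v : Nat) (k : Nat) => v ^^^ v >>> k) n [32, 16, 8, 4, 2, 1]) % 2 =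
      pvParN n := by
    simp only [List.foldl_cons, List.foldl_nil]
    exact pvFold_parity n _ _ _ _ _ _ hbound rfl rfl rfl rfl rfl rfl
  rw [hloop, pvFoldB, pvBand_cast_one, pvBand_cast_one, hNat,
    Nat.mod_eq_of_lt (pvParN_lt_two n)]
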